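-- pv_equiv track=rewrite | github.com/Shinhunjun/multiplatform-war-narratives | venezuela-us-reddit-discourse/analysis/clustering/summarizer.py | format_samples_for_prompt
-- ===== SOURCE A (Python) =====
-- from typing import Dict, List, Optional
--
-- def format_samples_for_prompt(
--     texts: List[str],
--     max_chars_per_text: int = 500,
--     max_total_chars: int = 8000,
-- ) -> str:
--     """Format text samples for LLM prompt."""
--     formatted = []
--     total_chars = 0
--
--     for i, text in enumerate(texts, 1):
--         # Truncate individual text
--         if len(text) > max_chars_per_text:
--             text = text[:max_chars_per_text] + "..."
--
--         entry = f"{i}. {text}"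
--
--         if total_chars + len(entry) > max_total_chars:
--             break
--
--         formatted.append(entry)
--         total_chars += len(entry)
--
--     return "\n\n".join(formatted)
-- ===== SOURCE B (Python) =====
-- def format_samples_for_prompt(
--     texts,
--     max_chars_per_text: int = 500,
--     max_total_chars: int = 8000,
-- ) -> str:
--     """Format text samples for LLM prompt (table-then-cutoff decomposition)."""
--     entries = [
--         f"{i}. {t[:max_chars_per_text] + '...' if len(t) > max_chars_per_text else t}"
--         for i, t in enumerate(texts, 1)
--     ]
--     totals = []
--     s = 0
--     for e in entries:
--         s += len(e)
--         totals.append(s)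
--     cutoff = sum(1 for s in totals if s <= max_total_chars)
--     return "\n\n".join(entries[:cutoff])
-- ===== Notes on version B (the rewrite author's own statement) =====
-- stated objective: alternative
-- what changed: Replaced A's single loop with running total and early break by a build-table-then-locate-cutoff decomposition: a comprehension of all formatted entries, cumulative length totals, a count of totals within the budget, and a join of that prefix.
import Mathlib
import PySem

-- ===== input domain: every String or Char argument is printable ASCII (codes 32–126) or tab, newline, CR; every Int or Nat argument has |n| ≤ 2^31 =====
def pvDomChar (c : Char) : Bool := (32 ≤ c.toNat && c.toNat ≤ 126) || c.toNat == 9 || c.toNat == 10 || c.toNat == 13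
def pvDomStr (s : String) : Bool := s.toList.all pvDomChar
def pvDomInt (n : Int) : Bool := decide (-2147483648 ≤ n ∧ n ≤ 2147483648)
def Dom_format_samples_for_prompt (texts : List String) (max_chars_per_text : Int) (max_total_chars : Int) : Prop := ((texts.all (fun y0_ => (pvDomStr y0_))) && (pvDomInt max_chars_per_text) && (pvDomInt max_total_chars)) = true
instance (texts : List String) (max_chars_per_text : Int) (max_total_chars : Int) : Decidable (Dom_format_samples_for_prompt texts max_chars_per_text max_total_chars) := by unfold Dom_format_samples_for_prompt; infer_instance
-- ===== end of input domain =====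

-- B is an alternative decomposition of A: instead of A's single loop with a running
-- total and an early break, B builds the full table of formatted entries, computes the
-- running character totals, counts how many stay within the budget, and joins that prefix.

-- ===== PORT A =====
-- A's loop: for i, text in enumerate(texts, 1): truncate, build entry, break on budget, append.
def fspA_go (mper mtot : Int) : List String → Int → Int → List (List Char) → List (List Char)
  | [], _, _, formatted => formatted
  | t :: ts, i, total, formatted =>
    let tl := t.toList
    let tl := if (PySem.Chars.len tl : Int) > mper
              then PySem.List.slice tl none (some mper) ++ "...".toList else tl
    let entry := PySem.Int.toChars i ++ ". ".toList ++ tl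
    if total + (PySem.Chars.len entry : Int) > mtot then formatted
    else fspA_go mper mtot ts (i + 1) (total + (PySem.Chars.len entry : Int)) (formatted ++ [entry])

def format_samples_for_prompt (texts : List String) (max_chars_per_text : Int) (max_total_chars : Int) : String :=
  String.ofList (PySem.Chars.join "\n\n".toList (fspA_go max_chars_per_text max_total_chars texts 1 0 []))

-- ===== PORT B =====
-- one formatted entry "i. text" (with the per-text truncation)
def fspB_entry (mper : Int) (p : Int × String) : List Char :=
  let tl := p.2.toList
  PySem.Int.toChars p.1 ++ ". ".toList ++
    (if (PySem.Chars.len tl : Int) > mper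
     then PySem.List.slice tl none (some mper) ++ "...".toList else tl)

-- running cumulative totals of the entry lengths
def fspB_totals : List (List Char) → Int → List Int
  | [], _ => []
  | e :: es, s => (s + (PySem.Chars.len e : Int)) :: fspB_totals es (s + (PySem.Chars.len e : Int))

def format_samples_for_prompt_alt (texts : List String) (max_chars_per_text : Int) (max_total_chars : Int) : String :=
  let entries := (PySem.List.enumerate texts 1).map (fspB_entry max_chars_per_text)
  let totals := fspB_totals entries 0
  let cutoff := totals.countP (fun s => s ≤ max_total_chars)
  String.ofList (PySem.Chars.join "\n\n".toList (entries.take cutoff))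

-- ===== PRECONDITION & SPEC =====
def Spec_format_samples_for_prompt (texts : List String) (max_chars_per_text : Int) (max_total_chars : Int) (out : String) : Prop := out = format_samples_for_prompt_alt texts max_chars_per_text max_total_chars
instance (texts : List String) (max_chars_per_text : Int) (max_total_chars : Int) (out : String) : Decidable (Spec_format_samples_for_prompt texts max_chars_per_text max_total_chars out) := by unfold Spec_format_samples_for_prompt; infer_instance

-- ===== CLAIM (what is proved, stated in full; the proofs are below) =====
def Claim_equal_format_samples_for_prompt : Prop := ∀ (texts : List String) (max_chars_per_text : Int) (max_total_chars : Int), Dom_format_samples_for_prompt texts max_chars_per_text max_total_chars → Spec_format_samples_for_prompt texts max_chars_per_text max_total_chars (format_samples_for_prompt texts max_chars_per_text max_total_chars)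

-- ===== LEMMAS AND PROOFS =====

-- every cumulative total is at least the starting sum
lemma fspB_totals_ge (es : List (List Char)) (s : Int) :
    ∀ x ∈ fspB_totals es s, s ≤ x := by
  induction es generalizing s with
  | nil => intro x hx; simp [fspB_totals] at hx
  | cons e es ih =>
    intro x hx
    simp only [fspB_totals, List.mem_cons] at hx
    rcases hx with h | h
    · subst h; have : (0 : Int) ≤ (PySem.Chars.len e : Int) := Int.natCast_nonneg _
      omega
    · have := ih (s + (PySem.Chars.len e : Int)) x h
      have : (0 : Int) ≤ (PySem.Chars.len e : Int) := Int.natCast_nonneg _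
      omega

-- A's break-loop equals B's count-the-prefix cutoff, for any start index/total/accumulator
lemma fspA_go_eq (mper mtot : Int) (ts : List String) (i total : Int) (acc : List (List Char)) :
    fspA_go mper mtot ts i total acc =
      acc ++ (let es := (PySem.List.enumerate ts i).map (fspB_entry mper)
              es.take ((fspB_totals es total).countP (fun s => s ≤ mtot))) := by
  induction ts generalizing i total acc with
  | nil => simp [fspA_go, PySem.List.enumerate_nil, fspB_totals]
  | cons t ts ih =>
    simp only [fspA_go, PySem.List.enumerate_cons, List.map_cons]
    set e := fspB_entry mper (i, t) with he
    have hentry : PySem.Int.toChars i ++ ". ".toList ++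
        (if (PySem.Chars.len t.toList : Int) > mper
         then PySem.List.slice t.toList none (some mper) ++ "...".toList else t.toList) = e := rfl
    simp only [fspB_totals]
    by_cases hbr : total + (PySem.Chars.len e : Int) > mtot
    · -- break: the first total already exceeds, and all later ones do too
      have h0 : ¬ (total + (PySem.Chars.len e : Int) ≤ mtot) := by omega
      have hrest : (fspB_totals ((PySem.List.enumerate ts (i+1)).map (fspB_entry mper))
          (total + (PySem.Chars.len e : Int))).countP (fun s => s ≤ mtot) = 0 := by
        rw [List.countP_eq_zero]
        intro x hx
        have := fspB_totals_ge _ _ x hx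
        simp only [decide_eq_true_eq]
        omega
      simp only [hentry, if_pos hbr, List.countP_cons, decide_eq_true_eq, h0, if_false, hrest]
      simp
    · have h0 : total + (PySem.Chars.len e : Int) ≤ mtot := by omega
      simp only [hentry, if_neg hbr, List.countP_cons, decide_eq_true_eq, h0, if_true,
        List.take_succ_cons]
      rw [ih (i + 1) (total + (PySem.Chars.len e : Int)) (acc ++ [e])]
      simp

-- ===== VERDICT (by name: the statement is the Claim_ definition above) =====
theorem format_samples_for_prompt_spec : Claim_equal_format_samples_for_prompt := by
  intro texts mper mtot _
  unfold Spec_format_samples_for_prompt format_samples_for_prompt format_samples_for_prompt_alt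
  rw [fspA_go_eq]
  simp
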